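-- pv_equiv track=rewrite | github.com/mvarukha/practicum15 | task_6.py | degree5
-- ===== SOURCE A (Python) =====
-- def degree5(n: int) -> int:
--     """
--     Recursively checks if n is a power of 5.
--     Returns the exponent if true, otherwise returns -1.
--     """
--     if n == 1:
--         return 0  # 5^0 = 1
--     if n % 5 != 0:
--         return -1  # n is not divisible by 5, so not a power of 5.
--     result = degree5(n // 5)
--     if result == -1:
--         return -1
--     return result + 1
-- ===== SOURCE B (Python) =====
-- def degree5(n: int) -> int:
--     if n == 1:
--         return 0
--     exp = 0
--     while n % 5 == 0:
--         n //= 5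
--         exp += 1
--         if n == 1:
--             return exp
--     return -1
-- ===== Notes on version B (the rewrite author's own statement) =====
-- stated objective: simpler
-- what changed: Replaced the self-call that threads the exponent back up through '-1' checks with a flat iterative loop dividing by 5 and counting in an accumulator.
-- outside the precondition, e.g. on degree5(0): A raises RecursionError, B does not finish within the time limit
import Mathlib
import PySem

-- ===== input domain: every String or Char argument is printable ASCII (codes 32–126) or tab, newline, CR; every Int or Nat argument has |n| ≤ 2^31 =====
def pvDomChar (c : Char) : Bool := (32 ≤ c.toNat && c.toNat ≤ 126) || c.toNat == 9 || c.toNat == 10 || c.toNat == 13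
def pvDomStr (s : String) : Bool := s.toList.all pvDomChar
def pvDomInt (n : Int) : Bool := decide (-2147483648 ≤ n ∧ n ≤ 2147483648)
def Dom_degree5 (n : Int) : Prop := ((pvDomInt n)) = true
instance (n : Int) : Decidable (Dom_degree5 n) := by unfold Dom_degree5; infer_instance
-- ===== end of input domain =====

-- B replaces A's recursion (which threads the exponent back up through -1 checks)
-- with a flat dividing loop and an accumulator; equal on all n ≠ 0.

-- ===== PORT A =====
-- Fuel makes Python's recursion total in Lean; |n| + 1 recursion steps suffice for every n ≠ 0
-- (the fuel-out branch is never reached inside Pre_).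
def degree5Rec : Nat → Int → Int
  | 0, _ => -1
  | f + 1, n =>
    if n = 1 then 0
    else if PySem.Int.mod n 5 ≠ 0 then -1
    else
      let result := degree5Rec f (PySem.Int.floordiv n 5)
      if result = -1 then -1 else result + 1

def degree5 (n : Int) : Int := degree5Rec (n.natAbs + 1) n

-- ===== PORT B =====
-- the while-loop of Source B, fuel-bounded the same way
def degree5Loop : Nat → Int → Int → Int
  | 0, _, _ => -1
  | f + 1, n, exp =>
    if PySem.Int.mod n 5 = 0 then
      let n' := PySem.Int.floordiv n 5
      let exp' := exp + 1
      if n' = 1 then exp' else degree5Loop f n' exp'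
    else -1

def degree5_alt (n : Int) : Int :=
  if n = 1 then 0 else degree5Loop (n.natAbs + 1) n 0

-- ===== PRECONDITION & SPEC =====
-- Pre_ excludes only n = 0, where Python A raises RecursionError (and B loops forever).
def Pre_degree5 (n : Int) : Prop := n ≠ 0
instance (n : Int) : Decidable (Pre_degree5 n) := by unfold Pre_degree5; infer_instance
def pvWitness_degree5 : Int := (125)

def Spec_degree5 (n : Int) (out : Int) : Prop := out = degree5_alt n
instance (n : Int) (out : Int) : Decidable (Spec_degree5 n out) := by unfold Spec_degree5; infer_instance

-- ===== CLAIM (what is proved, stated in full; the proofs are below) =====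
def Claim_equal_degree5 : Prop := ∀ (n : Int), Dom_degree5 n → Pre_degree5 n → Spec_degree5 n (degree5 n)

-- ===== LEMMAS AND PROOFS =====

theorem mod5_zero_iff (n : Int) : PySem.Int.mod n 5 = 0 ↔ (5:Int) ∣ n :=
  PySem.Int.mod_eq_zero_iff_dvd n 5

theorem floordiv5_natAbs_lt (n : Int) (hn : n ≠ 0) (hd : (5:Int) ∣ n) :
    (PySem.Int.floordiv n 5).natAbs < n.natAbs := by
  rw [PySem.Int.floordiv_eq_ediv_of_pos (by norm_num : (0:Int) < 5)]
  obtain ⟨k, rfl⟩ := hd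
  rw [Int.mul_ediv_cancel_left k (by norm_num)]
  have hk : k ≠ 0 := by rintro rfl; simp at hn
  simp [Int.natAbs_mul]
  omega

theorem floordiv5_ne_zero (n : Int) (hn : n ≠ 0) (hd : (5:Int) ∣ n) :
    PySem.Int.floordiv n 5 ≠ 0 := by
  rw [PySem.Int.floordiv_eq_ediv_of_pos (by norm_num : (0:Int) < 5)]
  obtain ⟨k, rfl⟩ := hd
  rw [Int.mul_ediv_cancel_left k (by norm_num)]
  rintro rfl; simp at hn

-- the recursion never returns below -1
theorem rec_ge_neg_one : ∀ (f : Nat) (n : Int), -1 ≤ degree5Rec f n := by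
  intro f
  induction f with
  | zero => intro n; simp [degree5Rec]
  | succ f ih =>
    intro n
    simp only [degree5Rec]
    split_ifs with h1 h2 h3
    · norm_num
    · norm_num
    · norm_num
    · have := ih (PySem.Int.floordiv n 5); omega

-- loop ↔ recursion: with enough fuel, the loop from (n, exp) computes A's value shifted by exp
theorem loop_eq_rec (f : Nat) :
    ∀ (n : Int) (exp : Int), n ≠ 0 → n ≠ 1 → n.natAbs ≤ f →
      degree5Loop f n exp =
        (if degree5Rec f n = -1 then -1 else degree5Rec f n + exp) := by
  induction f with
  | zero => intro n exp hn0 _ hle; exfalso; omega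
  | succ f ih =>
    intro n exp hn0 hn1 hle
    by_cases hm : PySem.Int.mod n 5 = 0
    · have hd : (5:Int) ∣ n := (mod5_zero_iff n).mp hm
      have hlt := floordiv5_natAbs_lt n hn0 hd
      have hne := floordiv5_ne_zero n hn0 hd
      set n' := PySem.Int.floordiv n 5 with hn'
      have hfd : n' = n / 5 := hn'.trans (PySem.Int.floordiv_eq_ediv_of_pos (by norm_num : (0:Int) < 5))
      by_cases h1 : n' = 1
      · -- loop returns exp+1; the recursion computes degree5Rec f 1 = 0 then adds 1
        have hf : 1 ≤ f := by omega
        have hrec1 : degree5Rec f (1:Int) = 0 := by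
          match f, hf with
          | (f'' + 1), _ => simp [degree5Rec]
        have h1' : n / 5 = 1 := hfd ▸ h1
        have hL : degree5Loop (f + 1) n exp = exp + 1 := by
          simp [degree5Loop, hd, h1']
        have hR : degree5Rec (f + 1) n = 1 := by
          simp [degree5Rec, hn1, hd, h1', hrec1]
        rw [hL, hR]; norm_num; omega
      · have ihh := ih n' (exp + 1) hne h1 (by omega)
        have h1' : ¬ n / 5 = 1 := fun h => h1 (hfd.trans h)
        have hL : degree5Loop (f + 1) n exp = degree5Loop f n' (exp + 1) := by
          simp [degree5Loop, hd, h1', hfd]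
        have hR : degree5Rec (f + 1) n =
            if degree5Rec f n' = -1 then -1 else degree5Rec f n' + 1 := by
          simp [degree5Rec, hn1, hd, hfd]
        rw [hL, hR, ihh]
        by_cases hr : degree5Rec f n' = -1
        · simp [hr]
        · have := rec_ge_neg_one f n'
          rw [if_neg hr, if_neg (by omega)]
          omega
    · have hd : ¬ (5:Int) ∣ n := fun h => hm ((mod5_zero_iff n).mpr h)
      have hL : degree5Loop (f + 1) n exp = -1 := by simp [degree5Loop, hd]
      have hR : degree5Rec (f + 1) n = -1 := by simp [degree5Rec, hn1, hd]
      rw [hL, hR]; norm_num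

-- ===== VERDICT (by name: the statement is the Claim_ definition above) =====
theorem degree5_spec : Claim_equal_degree5 := by
  intro n _ hpre
  unfold Spec_degree5 degree5 degree5_alt
  by_cases h1 : n = 1
  · subst h1; decide
  · rw [if_neg h1, loop_eq_rec (n.natAbs + 1) n 0 hpre h1 (by omega)]
    by_cases hr : degree5Rec (n.natAbs + 1) n = -1 <;> simp [hr]
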